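-- pv_equiv track=rewrite | github.com/panchopuntoexe/AEIS-30DaysOfCode | Día 13/CesarCipher.py | cifrar_cesar_alfanumerico
-- ===== SOURCE A (Python) =====
-- def cifrar_cesar_alfanumerico(mensaje: str, posiciones):
--     mensaje_cifrado = ""
--     for char in mensaje:
--             ascii_char = ord(char)
--             for _ in range(posiciones):
--                 if ascii_char == 126:
--                     ascii_char = 31
--                 ascii_char += 1
--             mensaje_cifrado += chr(ascii_char)
--     return mensaje_cifrado.replace("!"," ")
-- ===== SOURCE B (Python) =====
-- def cifrar_cesar_alfanumerico(mensaje: str, posiciones):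
--     # O(1) modular arithmetic per character instead of looping `posiciones` times.
--     if posiciones <= 0:
--         return mensaje.replace("!", " ")
--     out = []
--     for ch in mensaje:
--         c = ord(ch)
--         if posiciones <= 126 - c:
--             c += posiciones
--         else:
--             c = 32 + (posiciones - (126 - c) - 1) % 95
--         out.append(chr(c))
--     return "".join(out).replace("!", " ")
-- ===== Notes on version B (the rewrite author's own statement) =====
-- stated objective: faster
-- what changed: Replaces the inner loop that steps the code point `posiciones` times (wrapping 126->32) with a closed-form per-character computation: walk to 126 if needed, then take the remaining offset mod 95 over the 32..126 cycle.
import Mathlib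
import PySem

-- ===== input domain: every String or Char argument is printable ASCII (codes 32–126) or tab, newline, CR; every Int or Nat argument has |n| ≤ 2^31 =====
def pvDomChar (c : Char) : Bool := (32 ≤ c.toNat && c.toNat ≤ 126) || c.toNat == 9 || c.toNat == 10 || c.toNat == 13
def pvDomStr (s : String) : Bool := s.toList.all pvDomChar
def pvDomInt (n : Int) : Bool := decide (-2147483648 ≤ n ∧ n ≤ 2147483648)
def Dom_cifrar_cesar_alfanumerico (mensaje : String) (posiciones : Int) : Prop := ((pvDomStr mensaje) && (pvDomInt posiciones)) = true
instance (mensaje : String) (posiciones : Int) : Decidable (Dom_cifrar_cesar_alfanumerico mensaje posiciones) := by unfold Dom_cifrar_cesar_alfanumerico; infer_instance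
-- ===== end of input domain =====

-- B replaces A's inner loop (step the code `posiciones` times, wrapping 126→32) by a
-- closed-form per-character computation over the 32..126 cycle; measured faster (asymptotic).

-- ===== PORT A =====
def cifrar_cesar_alfanumerico (mensaje : String) (posiciones : Int) : String :=
  let mensaje_cifrado : List Char :=
    mensaje.toList.foldl (fun acc char =>
      let ascii_char : Int := (char.toNat : Int)
      let ascii_char :=
        (PySem.List.pyRange 0 posiciones 1).foldl
          (fun a _ => (if a = 126 then 31 else a) + 1) ascii_char
      acc ++ [Char.ofNat ascii_char.toNat]) []
  PySem.Str.replace (String.ofList mensaje_cifrado) "!" " "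

-- ===== PORT B =====
def cifrar_cesar_alfanumerico_alt (mensaje : String) (posiciones : Int) : String :=
  if posiciones ≤ 0 then PySem.Str.replace mensaje "!" " "
  else
    let out : List Char :=
      mensaje.toList.map (fun ch =>
        let c : Int := (ch.toNat : Int)
        let c := if posiciones ≤ 126 - c then c + posiciones
                 else 32 + PySem.Int.mod (posiciones - (126 - c) - 1) 95
        Char.ofNat c.toNat)
    PySem.Str.replace (String.ofList out) "!" " "

-- ===== PRECONDITION & SPEC =====
def Spec_cifrar_cesar_alfanumerico (mensaje : String) (posiciones : Int) (out : String) : Prop := out = cifrar_cesar_alfanumerico_alt mensaje posiciones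
instance (mensaje : String) (posiciones : Int) (out : String) : Decidable (Spec_cifrar_cesar_alfanumerico mensaje posiciones out) := by unfold Spec_cifrar_cesar_alfanumerico; infer_instance

-- ===== CLAIM (what is proved, stated in full; the proofs are below) =====
def Claim_equal_cifrar_cesar_alfanumerico : Prop := ∀ (mensaje : String) (posiciones : Int), Dom_cifrar_cesar_alfanumerico mensaje posiciones → Spec_cifrar_cesar_alfanumerico mensaje posiciones (cifrar_cesar_alfanumerico mensaje posiciones)

-- ===== LEMMAS AND PROOFS =====

/-- A fold that ignores the list elements is function iteration. -/
theorem foldl_const_iterate (f : Int → Int) (l : List Int) (c : Int) :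
    l.foldl (fun a _ => f a) c = f^[l.length] c := by
  induction l generalizing c with
  | nil => rfl
  | cons x t ih => simpa [Function.iterate_succ_apply] using ih (f c)

/-- Closed form of A's inner loop for a starting code ≤ 126. -/
theorem iterate_step_closed (n : Nat) (c : Int) (hc : c ≤ 126) :
    (fun a : Int => (if a = 126 then 31 else a) + 1)^[n] c =
      if (n : Int) ≤ 126 - c then c + n
      else 32 + PySem.Int.mod ((n : Int) - (126 - c) - 1) 95 := by
  induction n with
  | zero => simp; omega
  | succ m ih =>
    rw [Function.iterate_succ_apply', ih]
    rw [PySem.Int.mod_eq_emod_of_pos (by omega), PySem.Int.mod_eq_emod_of_pos (by omega)]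
    push_cast
    split_ifs with h1 h2 h3 h2 h3 <;> omega

-- ===== VERDICT (by name: the statement is the Claim_ definition above) =====
theorem cifrar_cesar_alfanumerico_spec : Claim_equal_cifrar_cesar_alfanumerico := by
  intro mensaje posiciones hdom
  show cifrar_cesar_alfanumerico mensaje posiciones = cifrar_cesar_alfanumerico_alt mensaje posiciones
  unfold cifrar_cesar_alfanumerico cifrar_cesar_alfanumerico_alt
  simp only [PySem.List.foldl_append_singleton_eq_map, List.nil_append]
  have hdomS : pvDomStr mensaje = true := by
    unfold Dom_cifrar_cesar_alfanumerico at hdom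
    simp only [Bool.and_eq_true] at hdom
    exact hdom.1
  by_cases hp : posiciones ≤ 0
  · -- empty range: A maps each char to itself
    rw [if_pos hp, PySem.List.pyRange_one_eq_nil (by omega)]
    simp [List.foldl, Char.ofNat_toNat, String.ofList_toList]
  · rw [if_neg hp]
    congr 2
    apply List.map_congr_left
    intro ch hch
    have hvalid : pvDomChar ch = true := by
      have := List.all_eq_true.mp hdomS ch hch; simpa using this
    have hle : (ch.toNat : Int) ≤ 126 := by
      unfold pvDomChar at hvalid; simp at hvalid; omega
    rw [foldl_const_iterate, iterate_step_closed _ _ hle]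
    have hn : ((PySem.List.pyRange 0 posiciones 1).length : Int) = posiciones := by
      rw [PySem.List.length_pyRange_one]; omega
    simp only [hn]
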